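-- pv_equiv track=rewrite | github.com/Saurav-Paul/AI-virtual-assistant-python | run/run.py | all_args
-- ===== SOURCE A (Python) =====
-- def all_args(lt):
--     ok = False
--     arg = ''
--     for w in lt:
--         if ok:
--             arg += w +' '
--         if w=='-arg':
--             ok = True
--     return arg.strip()
-- ===== SOURCE B (Python) =====
-- def all_args(lt):
--     if '-arg' not in lt:
--         return ''
--     i = lt.index('-arg')
--     return ' '.join(lt[i+1:]).strip()
-- ===== Notes on version B (the rewrite author's own statement) =====
-- stated objective: idiomatic
-- what changed: Replaces the boolean-flag scan with string accumulation by locating the first '-arg' via list.index and returning ' '.join of the slice after it, stripped.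
import Mathlib
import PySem

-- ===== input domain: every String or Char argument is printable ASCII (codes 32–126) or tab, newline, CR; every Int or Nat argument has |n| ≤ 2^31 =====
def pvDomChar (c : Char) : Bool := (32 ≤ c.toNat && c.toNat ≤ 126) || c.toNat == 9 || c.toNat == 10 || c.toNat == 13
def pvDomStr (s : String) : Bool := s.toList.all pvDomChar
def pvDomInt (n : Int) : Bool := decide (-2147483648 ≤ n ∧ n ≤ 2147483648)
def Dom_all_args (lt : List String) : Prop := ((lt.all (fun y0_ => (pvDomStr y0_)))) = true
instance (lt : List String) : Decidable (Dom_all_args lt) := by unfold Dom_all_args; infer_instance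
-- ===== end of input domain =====

-- B replaces A's boolean-flag scan with 'locate the marker, join the slice after it, strip' (objective: idiomatic).

-- ===== PORT A =====
-- one iteration of A's loop body: state = (ok, arg) with arg kept as List Char ('+= w + " "' is exact on chars)
def aStep (st : Bool × List Char) (w : String) : Bool × List Char :=
  let st1 := if st.1 then (st.1, st.2 ++ w.toList ++ [' ']) else st
  if w == "-arg" then (true, st1.2) else st1

def all_args (lt : List String) : String :=
  String.ofList (PySem.Chars.strip (lt.foldl aStep (false, [])).2)

-- ===== PORT B =====
def all_args_alt (lt : List String) : String :=
  match PySem.List.index? lt "-arg" with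
  | none => ""
  | some i => PySem.Str.strip (PySem.Str.join " " (PySem.List.slice lt (some ((i : Int) + 1)) none))

-- ===== PRECONDITION & SPEC =====
def Spec_all_args (lt : List String) (out : String) : Prop := out = all_args_alt lt
instance (lt : List String) (out : String) : Decidable (Spec_all_args lt out) := by unfold Spec_all_args; infer_instance

-- ===== CLAIM (what is proved, stated in full; the proofs are below) =====
def Claim_equal_all_args : Prop := ∀ (lt : List String), Dom_all_args lt → Spec_all_args lt (all_args lt)

-- ===== LEMMAS AND PROOFS =====

-- before the marker the state is unchanged
theorem foldl_aStep_false (l : List String) (h : "-arg" ∉ l) :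
    l.foldl aStep (false, []) = (false, []) := by
  induction l with
  | nil => rfl
  | cons w rest ih =>
    simp only [List.mem_cons, not_or] at h
    have hw : (w == "-arg") = false := by
      simp only [beq_eq_false_iff_ne]; exact fun hc => h.1 (hc ▸ rfl)
    simp only [List.foldl_cons, aStep, hw]
    exact ih h.2

-- after the marker the loop appends w.toList ++ [' '] for every word
theorem foldl_aStep_true (l : List String) (acc : List Char) :
    l.foldl aStep (true, acc) = (true, acc ++ (l.map (fun w => w.toList ++ [' '])).flatten) := by
  induction l generalizing acc with
  | nil => simp
  | cons w rest ih =>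
    simp only [List.foldl_cons, aStep]
    by_cases hw : w = "-arg" <;>
      simp [hw, ih, List.append_assoc]

theorem flat_eq_join_space (l : List String) (h : l ≠ []) :
    (l.map (fun w => w.toList ++ [' '])).flatten
      = PySem.Chars.join [' '] (l.map String.toList) ++ [' '] := by
  induction l with
  | nil => exact absurd rfl h
  | cons w rest ih =>
    cases rest with
    | nil => simp [PySem.Chars.join, List.intercalate]
    | cons q rs =>
      rw [List.map_cons, List.flatten_cons, ih (by simp)]
      simp only [List.map_cons, PySem.Chars.join_cons_cons]
      simp [List.append_assoc]

theorem rstrip_append_space (s : List Char) :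
    PySem.Chars.rstrip (s ++ [' ']) = PySem.Chars.rstrip s := by
  simp [PySem.Chars.rstrip, PySem.Chars.isspace]

theorem strip_append_space (s : List Char) :
    PySem.Chars.strip (s ++ [' ']) = PySem.Chars.strip s := by
  simp only [PySem.Chars.strip, PySem.Chars.lstrip, List.dropWhile_append]
  by_cases h : (List.dropWhile PySem.Chars.isspace s).isEmpty
  · rw [if_pos h, List.isEmpty_iff.mp h]
    simp [List.dropWhile, PySem.Chars.isspace, PySem.Chars.rstrip]
  · rw [if_neg h]
    exact rstrip_append_space _

-- ===== VERDICT (by name: the statement is the Claim_ definition above) =====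
theorem all_args_spec : Claim_equal_all_args := by
  intro lt _
  unfold Spec_all_args all_args all_args_alt
  cases hidx : PySem.List.index? lt "-arg" with
  | none =>
    have hnm : "-arg" ∉ lt := (PySem.List.index?_eq_none_iff lt "-arg").mp hidx
    rw [foldl_aStep_false lt hnm]
    rfl
  | some i =>
    obtain ⟨pre, suf, hlt, hlen, hpre⟩ := (PySem.List.index?_eq_some_iff lt "-arg" i).mp hidx
    subst hlt
    dsimp only
    -- A's side
    rw [List.foldl_append, foldl_aStep_false pre hpre, List.foldl_cons]
    have hstep : aStep (false, []) "-arg" = (true, []) := by simp [aStep]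
    rw [hstep, foldl_aStep_true]
    -- B's side
    have hdrop : PySem.List.slice (pre ++ "-arg" :: suf) (some ((i : Int) + 1)) none = suf := by
      rw [show ((i : Int) + 1) = ((i + 1 : Nat) : Int) by push_cast; ring,
        PySem.List.slice_from _ (by positivity)]
      simp [← hlen]
    rw [hdrop]
    -- equal after strip
    cases suf with
    | nil => rfl
    | cons q rs =>
      simp only [List.nil_append, PySem.Str.strip, PySem.Str.join]
      rw [flat_eq_join_space (q :: rs) (by simp), strip_append_space]
      simp [PySem.Chars.join]
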